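-- pv_equiv track=rewrite | github.com/vosslab/biology-problems | inheritance-problems/genotypelib.py | createGenotypeStringFromList
-- ===== SOURCE A (Python) =====
-- def createGenotypeStringFromList(gene_list):
-- 	genestr = ""
-- 	gamete_count = 1
-- 	for gene_pair in gene_list:
-- 		if gene_pair[0] != gene_pair[1]:
-- 			gamete_count *= 2
-- 		genestr += gene_pair[0] + gene_pair[1] + " "
-- 	return genestr, gamete_count
-- ===== SOURCE B (Python) =====
-- def createGenotypeStringFromList(gene_list):
-- 	n = len(gene_list)
-- 	if n == 0:
-- 		return "", 1
-- 	if n == 1: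
-- 		g = gene_list[0]
-- 		return g[0] + g[1] + " ", 2 if g[0] != g[1] else 1
-- 	s1, c1 = createGenotypeStringFromList(gene_list[:n // 2])
-- 	s2, c2 = createGenotypeStringFromList(gene_list[n // 2:])
-- 	return s1 + s2, c1 * c2
-- ===== Notes on version B (the rewrite author's own statement) =====
-- stated objective: alternative
-- what changed: Replaces the single left-to-right accumulator loop by a divide-and-conquer recursion: the list is split at its midpoint, each half is solved recursively, and the results are combined by string concatenation and count multiplication.
import Mathlib
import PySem

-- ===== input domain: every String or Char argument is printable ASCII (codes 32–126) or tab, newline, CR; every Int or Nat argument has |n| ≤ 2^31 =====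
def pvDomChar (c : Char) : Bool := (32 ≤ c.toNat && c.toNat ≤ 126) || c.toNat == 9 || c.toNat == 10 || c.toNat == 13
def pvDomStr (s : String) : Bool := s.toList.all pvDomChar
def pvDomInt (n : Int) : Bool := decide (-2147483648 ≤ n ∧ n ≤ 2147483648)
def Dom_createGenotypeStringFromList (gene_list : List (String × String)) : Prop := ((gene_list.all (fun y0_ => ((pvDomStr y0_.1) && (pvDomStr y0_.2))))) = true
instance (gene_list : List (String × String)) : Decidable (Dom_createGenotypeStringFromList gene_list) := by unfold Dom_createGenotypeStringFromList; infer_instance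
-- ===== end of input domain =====

-- B solves the task by divide-and-conquer (split at the midpoint, combine by concatenation and multiplication) instead of A's left-to-right accumulator loop; objective: alternative.

-- ===== PORT A =====
def createGenotypeStringFromList (gene_list : List (String × String)) : String × Int :=
  gene_list.foldl
    (fun acc gene_pair =>
      let gamete_count := if gene_pair.1 ≠ gene_pair.2 then acc.2 * 2 else acc.2
      (acc.1 ++ gene_pair.1 ++ gene_pair.2 ++ " ", gamete_count))
    ("", 1)

-- ===== PORT B =====
def createGenotypeStringFromList_alt (gene_list : List (String × String)) : String × Int :=
  match h : gene_list with
  | [] => ("", 1)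
  | [g] => (g.1 ++ g.2 ++ " ", if g.1 ≠ g.2 then 2 else 1)
  | _ :: _ :: _ =>
    let n := gene_list.length
    let r1 := createGenotypeStringFromList_alt (gene_list.take (n / 2))
    let r2 := createGenotypeStringFromList_alt (gene_list.drop (n / 2))
    (r1.1 ++ r2.1, r1.2 * r2.2)
termination_by gene_list.length
decreasing_by
  · simp_all; omega
  · simp_all; omega

-- ===== PRECONDITION & SPEC =====
def Spec_createGenotypeStringFromList (gene_list : List (String × String)) (out : String × Int) : Prop := out = createGenotypeStringFromList_alt gene_list
instance (gene_list : List (String × String)) (out : String × Int) : Decidable (Spec_createGenotypeStringFromList gene_list out) := by unfold Spec_createGenotypeStringFromList; infer_instance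

-- ===== CLAIM (what is proved, stated in full; the proofs are below) =====
def Claim_equal_createGenotypeStringFromList : Prop := ∀ (gene_list : List (String × String)), Dom_createGenotypeStringFromList gene_list → Spec_createGenotypeStringFromList gene_list (createGenotypeStringFromList gene_list)

-- ===== LEMMAS AND PROOFS =====

-- closed form both ports are reduced to
def pvF (l : List (String × String)) : String × Int :=
  (String.join (l.map (fun g => g.1 ++ g.2 ++ " ")),
   (2 : Int) ^ (l.countP (fun g => g.1 != g.2)))

theorem str_foldl_append (l : List String) (s : String) :
    l.foldl (fun r x => r ++ x) s = s ++ l.foldl (fun r x => r ++ x) "" := by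
  induction l generalizing s with
  | nil => simp
  | cons hd tl ih =>
    rw [List.foldl_cons, List.foldl_cons, ih (s ++ hd), ih ("" ++ hd)]
    simp [String.append_assoc]

theorem join_append (l1 l2 : List String) :
    String.join (l1 ++ l2) = String.join l1 ++ String.join l2 := by
  induction l1 with
  | nil => simp [String.join]
  | cons hd tl ih =>
    simp only [List.cons_append, String.join, List.foldl_cons]
    rw [str_foldl_append (tl ++ l2), str_foldl_append tl]
    simp only [String.join] at ih
    simp [ih, String.append_assoc]

theorem pvF_append (l1 l2 : List (String × String)) :
    pvF (l1 ++ l2) = ((pvF l1).1 ++ (pvF l2).1, (pvF l1).2 * (pvF l2).2) := by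
  simp [pvF, join_append, List.countP_append, pow_add]

theorem alt_eq_pvF (l : List (String × String)) :
    createGenotypeStringFromList_alt l = pvF l := by
  induction l using createGenotypeStringFromList_alt.induct with
  | case1 => simp [createGenotypeStringFromList_alt, pvF, String.join]
  | case2 g =>
    by_cases h : g.1 = g.2 <;>
      simp [createGenotypeStringFromList_alt, pvF, String.join, h]
  | case3 a b tl _n ih1 ih2 =>
    rw [createGenotypeStringFromList_alt]
    rw [ih1, ih2]
    have := pvF_append ((a :: b :: tl).take ((a :: b :: tl).length / 2))
      ((a :: b :: tl).drop ((a :: b :: tl).length / 2))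
    rw [List.take_append_drop] at this
    rw [this]

theorem genotype_foldl_general (l : List (String × String)) (s : String) (c : Int) :
    l.foldl
      (fun acc gene_pair =>
        let gamete_count := if gene_pair.1 ≠ gene_pair.2 then acc.2 * 2 else acc.2
        (acc.1 ++ gene_pair.1 ++ gene_pair.2 ++ " ", gamete_count))
      (s, c)
    = (s ++ (pvF l).1, c * (pvF l).2) := by
  induction l generalizing s c with
  | nil => simp [pvF, String.join]
  | cons hd tl ih =>
    simp only [List.foldl_cons, pvF, List.map_cons, List.countP_cons, String.join]
    rw [ih]
    refine Prod.ext ?_ ?_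
    · simp [pvF, String.join]
      rw [str_foldl_append (List.map (fun g => g.1 ++ g.2 ++ " ") tl) (hd.1 ++ hd.2 ++ " ")]
      simp [String.append_assoc]
    · by_cases h : hd.1 = hd.2
      · simp [pvF, h]
      · simp [pvF, h, pow_succ]; ring

-- ===== VERDICT (by name: the statement is the Claim_ definition above) =====
theorem createGenotypeStringFromList_spec : Claim_equal_createGenotypeStringFromList := by
  intro l _
  show _ = _
  rw [createGenotypeStringFromList, genotype_foldl_general, alt_eq_pvF]
  simp
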